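-- pv_equiv track=rewrite | github.com/sabrupu/comp151 | Project2/Problem4.py | word_with_least_occurrences
-- ===== SOURCE A (Python) =====
-- def word_with_least_occurrences(dict):
--     words = []
--     least_occurrences = min(dict.values())
--
--     for word in dict:
--         num_occurrences = dict[word]
--         if num_occurrences == least_occurrences:
--             words.append(word)
--
--     return words
-- ===== SOURCE B (Python) =====
-- def word_with_least_occurrences(dict):
--     groups = {}
--     for word, count in dict.items():
--         groups.setdefault(count, []).append(word)
--     return groups[min(groups)]
-- ===== Notes on version B (the rewrite author's own statement) =====
-- stated objective: simpler
-- what changed: Instead of computing min(values) and then re-scanning the dict filtering by a per-word lookup, B builds one grouping dict from occurrence-count to words (insertion order preserved) and returns the group at the minimal count; Pre_ excludes the empty dict (min raises ValueError in both) and association lists with duplicate keys, which cannot arise from a Python dict.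
import Mathlib
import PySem

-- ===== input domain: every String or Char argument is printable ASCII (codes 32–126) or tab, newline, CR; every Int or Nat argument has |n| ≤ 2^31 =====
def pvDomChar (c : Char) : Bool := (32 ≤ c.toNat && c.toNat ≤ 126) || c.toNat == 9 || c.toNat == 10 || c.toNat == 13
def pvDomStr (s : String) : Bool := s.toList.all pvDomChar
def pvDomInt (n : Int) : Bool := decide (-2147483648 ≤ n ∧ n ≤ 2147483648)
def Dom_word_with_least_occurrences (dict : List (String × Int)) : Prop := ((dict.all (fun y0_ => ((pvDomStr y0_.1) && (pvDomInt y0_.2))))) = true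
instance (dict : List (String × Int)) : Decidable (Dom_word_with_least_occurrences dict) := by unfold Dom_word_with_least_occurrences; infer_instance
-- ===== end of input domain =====

-- B replaces A's min-then-rescan-with-lookup by a single grouping pass (count → words, insertion order)
-- followed by indexing the group at the minimal count.  Objective: simpler.

-- ===== PORT A =====
-- least = min(dict.values()); then for word in dict: if dict[word] == least: words.append(word)
def word_with_least_occurrences (dict : List (String × Int)) : List String :=
  match PySem.List.min? (dict.map (fun p => p.2)) (fun y => y) with
  | none => []   -- min([]) raises ValueError; excluded by Pre_
  | some least =>
    dict.foldl (fun words p =>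
      match (PySem.Dict.mk dict).get? p.1 with
      | some n => if n == least then words ++ [p.1] else words
      | none => words) []    -- KeyError branch; unreachable, p.1 is a key of dict

-- ===== PORT B =====
-- groups: count → list of words (setdefault/append loop)
def pvGroups (dict : List (String × Int)) : PySem.Dict Int (List String) :=
  dict.foldl (fun d p => d.modify p.2 [] (fun ws => ws ++ [p.1])) PySem.Dict.empty

-- return groups[min(groups)]
def word_with_least_occurrences_alt (dict : List (String × Int)) : List String :=
  match PySem.List.min? (pvGroups dict).keys (fun y => y) with
  | none => []   -- min({}) raises ValueError; excluded by Pre_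
  | some least => (pvGroups dict).getD least []

-- ===== PRECONDITION & SPEC =====
-- Pre_ excludes the empty dict, on which A (and B) raise ValueError in min(), and association
-- lists with duplicate keys, which cannot arise from a genuine Python dict argument.
def Pre_word_with_least_occurrences (dict : List (String × Int)) : Prop :=
  dict ≠ [] ∧ (dict.map Prod.fst).Nodup
instance (dict : List (String × Int)) : Decidable (Pre_word_with_least_occurrences dict) := by
  unfold Pre_word_with_least_occurrences; infer_instance
def pvWitness_word_with_least_occurrences : (List (String × Int)) := [("a", 2), ("b", 1), ("c", 1)]

def Spec_word_with_least_occurrences (dict : List (String × Int)) (out : List String) : Prop := out = word_with_least_occurrences_alt dict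
instance (dict : List (String × Int)) (out : List String) : Decidable (Spec_word_with_least_occurrences dict out) := by unfold Spec_word_with_least_occurrences; infer_instance

-- ===== CLAIM (what is proved, stated in full; the proofs are below) =====
def Claim_equal_word_with_least_occurrences : Prop := ∀ (dict : List (String × Int)), Dom_word_with_least_occurrences dict → Pre_word_with_least_occurrences dict → Spec_word_with_least_occurrences dict (word_with_least_occurrences dict)

-- ===== LEMMAS AND PROOFS =====

-- min? (no key) only depends on the set of elements (for a linear order).
theorem min?_id_eq_of_mem_iff (xs ys : List Int) (h : ∀ a : Int, a ∈ xs ↔ a ∈ ys) :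
    PySem.List.min? xs (fun y => y) = PySem.List.min? ys (fun y => y) := by
  cases hx : PySem.List.min? xs (fun y => y) with
  | none =>
    rw [PySem.List.min?_eq_none_iff] at hx
    subst hx
    cases hy : PySem.List.min? ys (fun y => y) with
    | none => rfl
    | some m =>
      have hm := PySem.List.min?_mem hy
      exact absurd ((h m).mpr hm) (List.not_mem_nil)
  | some m =>
    have hmx := PySem.List.min?_mem hx
    cases hy : PySem.List.min? ys (fun y => y) with
    | none =>
      rw [PySem.List.min?_eq_none_iff] at hy
      subst hy
      exact absurd ((h m).mp hmx) (List.not_mem_nil)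
    | some m' =>
      have hm'y := PySem.List.min?_mem hy
      have h1 : m ≤ m' := PySem.List.min?_isMin hx m' ((h m').mpr hm'y)
      have h2 : m' ≤ m := PySem.List.min?_isMin hy m ((h m).mp hmx)
      exact congrArg some (le_antisymm h1 h2)

-- Under unique keys, looking a pair's key up in the whole dict gives its own value.
theorem lookup_self (dict : List (String × Int)) (hnd : (dict.map Prod.fst).Nodup)
    (p : String × Int) (hp : p ∈ dict) :
    (PySem.Dict.mk dict).get? p.1 = some p.2 :=
  PySem.Dict.get?_of_mem_items (d := PySem.Dict.mk dict) (k := p.1) (v := p.2) hp hnd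

-- B's grouping dict, looked up at any count c, lists the words with count c in order.
theorem groups_getD (dict : List (String × Int)) (c : Int) :
    (dict.foldl (fun d p => d.modify p.2 [] (fun ws => ws ++ [p.1])) PySem.Dict.empty).getD c []
      = (dict.filter (fun p => p.2 == c)).map (fun p => p.1) := by
  have : dict.foldl (fun d p => d.modify p.2 [] (fun ws => ws ++ [p.1])) PySem.Dict.empty
      = (dict.map (fun p => (p.2, p.1))).foldl
          (fun d q => d.modify q.1 [] (fun ws => ws ++ [q.2])) PySem.Dict.empty := by
    rw [List.foldl_map]
  rw [this, PySem.Dict.getD_foldl_modify_append]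
  simp [List.filter_map, Function.comp_def]

-- The keys of B's grouping dict are the distinct occurrence counts, so they carry the same
-- membership as dict.values().
theorem groups_keys (dict : List (String × Int)) :
    (dict.foldl (fun d p => d.modify p.2 [] (fun ws => ws ++ [p.1])) PySem.Dict.empty).keys
      = PySem.Set.ofList (dict.map (fun p => p.2)) := by
  rw [PySem.Dict.keys_foldl_modify_key dict (fun p => p.2) [] (fun _ p ws => ws ++ [p.1])]
  simp [PySem.Set.update_nil_left]

-- ===== VERDICT (by name: the statement is the Claim_ definition above) =====
theorem word_with_least_occurrences_spec : Claim_equal_word_with_least_occurrences := by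
  intro dict _ hpre
  obtain ⟨hne, hnd⟩ := hpre
  unfold Spec_word_with_least_occurrences word_with_least_occurrences word_with_least_occurrences_alt pvGroups
  rw [groups_keys]
  have hmins : PySem.List.min? (PySem.Set.ofList (dict.map (fun p => p.2))) (fun y => y)
      = PySem.List.min? (dict.map (fun p => p.2)) (fun y => y) := by
    apply min?_id_eq_of_mem_iff
    intro a; exact PySem.Set.mem_ofList _ _
  rw [hmins]
  cases hm : PySem.List.min? (dict.map (fun p => p.2)) (fun y => y) with
  | none => rfl
  | some m =>
    show dict.foldl (fun words p =>
        match (PySem.Dict.mk dict).get? p.1 with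
        | some n => if n == m then words ++ [p.1] else words
        | none => words) []
      = (dict.foldl (fun d p => d.modify p.2 [] (fun ws => ws ++ [p.1])) PySem.Dict.empty).getD m []
    rw [groups_getD]
    rw [PySem.List.foldl_congr_mem dict _
      (fun words p => if p.2 == m then words ++ [p.1] else words) []
      (by intro acc p hp; rw [lookup_self dict hnd p hp])]
    rw [PySem.List.foldl_append_if (fun p => p.2 == m) (fun p => p.1) dict []]
    rfl
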